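-- pv_equiv track=rewrite | github.com/HarikrishnanBalagopal/useful_scripts | fast_self_bleu.py | pre_calc_max_cnts
-- ===== SOURCE A (Python) =====
-- from collections import Counter, defaultdict
--
-- def get_ngrams(xs, n):
--     end = len(xs) - n + 1
--     if end <= 0:
--         return []
--     xs = tuple(xs)
--     ngrams = [xs[i:i+n] for i in range(end)]
--     return ngrams
--
-- def pre_calc_max_cnts(refs, n):
--     max_cnt = {}
--     for i, ref in enumerate(refs):
--         ref_cnt = Counter(get_ngrams(ref, n))
--         for ngram, cnt in ref_cnt.items():
--             if ngram not in max_cnt: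
--                 max_cnt[ngram] = (i, cnt, -1, 0)
--             else:
--                 i1, c1, i2, c2 = max_cnt[ngram]
--                 if cnt > c1:
--                     max_cnt[ngram] = (i, cnt, i1, c1)
--                 elif cnt > c2:
--                     max_cnt[ngram] = (i1, c1, i, cnt)
--     return max_cnt
-- ===== SOURCE B (Python) =====
-- from collections import Counter, defaultdict
--
-- def get_ngrams(xs, n):
--     end = len(xs) - n + 1
--     if end <= 0:
--         return []
--     xs = tuple(xs)
--     ngrams = [xs[i:i+n] for i in range(end)]
--     return ngrams
--
-- def pre_calc_max_cnts(refs, n):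
--     # Phase 1: index every per-reference ngram count under its ngram.
--     index = defaultdict(list)
--     for i, ref in enumerate(refs):
--         for ngram, cnt in Counter(get_ngrams(ref, n)).items():
--             index[ngram].append((i, cnt))
--     # Phase 2: per ngram, select the two best entries (highest count,
--     # earliest reference index breaks ties).
--     max_cnt = {}
--     for ngram, entries in index.items():
--         best = min(entries, key=lambda e: (-e[1], e[0]))
--         rest = [e for e in entries if e != best]
--         if rest:
--             second = min(rest, key=lambda e: (-e[1], e[0]))
--         else:
--             second = (-1, 0)
--         max_cnt[ngram] = (best[0], best[1], second[0], second[1])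
--     return max_cnt
-- ===== Notes on version B (the rewrite author's own statement) =====
-- stated objective: alternative
-- what changed: A streams over references keeping a running top-2 quadruple per ngram; B first builds a full index mapping each ngram to the list of (reference, count) entries, then selects the best and second-best entry per ngram by min-with-key over that list (ties broken by earliest reference index, (-1,0) sentinel when only one entry exists).
import Mathlib
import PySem

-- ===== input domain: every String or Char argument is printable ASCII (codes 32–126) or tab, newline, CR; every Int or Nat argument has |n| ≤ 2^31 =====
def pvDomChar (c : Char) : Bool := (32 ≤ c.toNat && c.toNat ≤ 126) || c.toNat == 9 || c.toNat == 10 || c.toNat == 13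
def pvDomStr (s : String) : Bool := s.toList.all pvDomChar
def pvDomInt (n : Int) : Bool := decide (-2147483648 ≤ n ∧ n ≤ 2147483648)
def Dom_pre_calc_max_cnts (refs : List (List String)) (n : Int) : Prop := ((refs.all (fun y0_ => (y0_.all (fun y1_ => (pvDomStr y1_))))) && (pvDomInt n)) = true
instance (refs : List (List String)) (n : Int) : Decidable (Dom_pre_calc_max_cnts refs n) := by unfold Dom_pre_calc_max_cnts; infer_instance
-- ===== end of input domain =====

-- B replaces A's streaming top-2 update with a two-phase decomposition (index all
-- per-reference counts per ngram, then select the two best entries per ngram);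
-- objective: alternative (same asymptotic cost, different structure).

-- ===== PORT A =====
-- helper shared by both Pythons (identical source in Source A and Source B)
def get_ngrams (xs : List String) (n : Int) : List (List String) :=
  let endd : Int := (xs.length : Int) - n + 1
  if endd ≤ 0 then []
  else (PySem.List.pyRange 0 endd 1).map (fun i => PySem.List.slice xs (some i) (some (i + n)))

-- body of A's inner loop over Counter items
def pvStepA (i : Int) (d : PySem.Dict (List String) (Int × Int × Int × Int))
    (q : List String × Int) : PySem.Dict (List String) (Int × Int × Int × Int) :=
  if d.contains q.1 = false then d.insert q.1 (i, q.2, -1, 0)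
  else
    match d.getD q.1 (0, 0, 0, 0) with
    | (i1, c1, _i2, c2) =>
      if c1 < q.2 then d.insert q.1 (i, q.2, i1, c1)
      else if c2 < q.2 then d.insert q.1 (i1, c1, i, q.2)
      else d

def pre_calc_max_cnts (refs : List (List String)) (n : Int) :
    List (List String × Int × Int × Int × Int) :=
  ((PySem.List.enumerate refs).foldl
    (fun d p => ((PySem.Dict.counter (get_ngrams p.2 n)).items).foldl (pvStepA p.1) d)
    PySem.Dict.empty).items

-- ===== PORT B =====
-- Source B's top2: best entry, then best of the rest ((-1,0) if none)
def pvTop2 (entries : List (Int × Int)) : Int × Int × Int × Int :=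
  -- min() raises on []; unreachable here: the index lists are built nonempty
  let best := (PySem.List.min2? entries (fun e => -e.2) (fun e => e.1)).getD (-1, 0)
  let rest := entries.filter (fun e => decide (e ≠ best))
  let second := if rest ≠ [] then
      (PySem.List.min2? rest (fun e => -e.2) (fun e => e.1)).getD (-1, 0)
    else ((-1 : Int), (0 : Int))
  (best.1, best.2, second.1, second.2)

-- body of B's phase-1 inner loop: index[ngram].append((i, cnt))
def pvStepX (i : Int) (d : PySem.Dict (List String) (List (Int × Int)))
    (q : List String × Int) : PySem.Dict (List String) (List (Int × Int)) :=
  d.insert q.1 (d.getD q.1 [] ++ [(i, q.2)])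

-- Source B's final dict comprehension body
def pvF (p : List String × List (Int × Int)) : List String × Int × Int × Int × Int :=
  (p.1, pvTop2 p.2)

def pre_calc_max_cnts_alt (refs : List (List String)) (n : Int) :
    List (List String × Int × Int × Int × Int) :=
  ((PySem.List.enumerate refs).foldl
    (fun d p => ((PySem.Dict.counter (get_ngrams p.2 n)).items).foldl (pvStepX p.1) d)
    PySem.Dict.empty).items.map pvF

-- ===== PRECONDITION & SPEC =====
def Spec_pre_calc_max_cnts (refs : List (List String)) (n : Int) (out : List (List String × Int × Int × Int × Int)) : Prop := out = pre_calc_max_cnts_alt refs n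
instance (refs : List (List String)) (n : Int) (out : List (List String × Int × Int × Int × Int)) : Decidable (Spec_pre_calc_max_cnts refs n out) := by unfold Spec_pre_calc_max_cnts; infer_instance

-- ===== CLAIM (what is proved, stated in full; the proofs are below) =====
def Claim_equal_pre_calc_max_cnts : Prop := ∀ (refs : List (List String)) (n : Int), Dom_pre_calc_max_cnts refs n → Spec_pre_calc_max_cnts refs n (pre_calc_max_cnts refs n)

-- ===== LEMMAS AND PROOFS =====

-- the fold step of PySem.List.min2? with keys (-e.2, e.1)
def pvMStep (acc : Option (Int × Int)) (x : Int × Int) : Option (Int × Int) :=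
  match acc with
  | none => some x
  | some m =>
    if (decide (-x.2 < -m.2) || (!decide (-m.2 < -x.2) && decide (x.1 < m.1))) then some x else some m

lemma pvmin_eq (xs : List (Int × Int)) :
    PySem.List.min2? xs (fun e => -e.2) (fun e => e.1) = xs.foldl pvMStep none := by
  unfold PySem.List.min2?
  congr 1
  funext acc x
  cases acc <;> rfl

lemma pvmin_mem (l : List (Int × Int)) :
    ∀ acc b, l.foldl pvMStep acc = some b → acc = some b ∨ b ∈ l := by
  induction l with
  | nil => intro acc b h; exact Or.inl h
  | cons x t ih =>
    intro acc b h
    rcases ih _ _ h with h' | h'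
    · cases acc with
      | none => simp [pvMStep] at h'; right; simp [h']
      | some m =>
        simp only [pvMStep] at h'
        split at h'
        · right; simp_all
        · left; simp_all
    · exact Or.inr (List.mem_cons_of_mem _ h')

lemma pvmin_isSome (l : List (Int × Int)) :
    ∀ m, ∃ b, l.foldl pvMStep (some m) = some b := by
  induction l with
  | nil => intro m; exact ⟨m, rfl⟩
  | cons x t ih =>
    intro m
    simp only [List.foldl_cons, pvMStep]
    split
    · exact ih x
    · exact ih m

lemma pvmin_some (x : Int × Int) (t : List (Int × Int)) :
    ∃ b, PySem.List.min2? (x :: t) (fun e => -e.2) (fun e => e.1) = some b ∧ b ∈ x :: t := by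
  rw [pvmin_eq]
  simp only [List.foldl_cons]
  have hx : pvMStep none x = some x := rfl
  rw [hx]
  obtain ⟨b, hb⟩ := pvmin_isSome t x
  refine ⟨b, hb, ?_⟩
  rcases pvmin_mem t (some x) b hb with h | h
  · simp at h; simp [h]
  · exact List.mem_cons_of_mem _ h

lemma pvMStep_fresh (m : Int × Int) (i c : Int) (h : m.1 < i) :
    pvMStep (some m) (i, c) = if m.2 < c then some (i, c) else some m := by
  simp only [pvMStep]
  split_ifs with h1 h2 h2 <;> simp_all <;> omega

lemma pvTop2_singleton (i c : Int) : pvTop2 [(i, c)] = (i, c, -1, 0) := by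
  simp [pvTop2, pvmin_eq, pvMStep, List.foldl]

-- CORE: appending a fresh, later-indexed entry to an index list updates B's
-- selection exactly as A's streaming branch does
lemma pvTop2_append (l : List (Int × Int)) (i c : Int) (hl : l ≠ [])
    (hlt : ∀ e ∈ l, e.1 < i) (hc : 1 ≤ c) :
    pvTop2 (l ++ [(i, c)]) =
      match pvTop2 l with
      | (i1, c1, i2, c2) =>
        if c1 < c then (i, c, i1, c1)
        else if c2 < c then (i1, c1, i, c)
        else (i1, c1, i2, c2) := by
  obtain ⟨x, t, rfl⟩ : ∃ x t, l = x :: t := by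
    cases l with | nil => exact absurd rfl hl | cons x t => exact ⟨x, t, rfl⟩
  obtain ⟨b, hminl, hbmem⟩ := pvmin_some x t
  have hbi : b.1 < i := hlt b hbmem
  set l := x :: t with hldef
  have hmin2 : PySem.List.min2? (l ++ [(i, c)]) (fun e => -e.2) (fun e => e.1)
      = if b.2 < c then some (i, c) else some b := by
    rw [pvmin_eq, List.foldl_append, ← pvmin_eq, hminl]
    simpa using pvMStep_fresh b i c hbi
  by_cases hbc : b.2 < c
  · -- new entry becomes the best
    have hrest : (l ++ [(i, c)]).filter (fun e => decide (e ≠ (i, c))) = l := by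
      have h1 : List.filter (fun e => decide (e ≠ (i, c))) [(i, c)] = [] := by simp
      rw [List.filter_append, h1, List.append_nil, List.filter_eq_self]
      intro a hm
      have h2 := hlt a hm
      simp only [ne_eq, decide_eq_true_eq]
      intro h; rw [h] at h2; simp at h2
    simp only [pvTop2, hmin2, hminl, Option.getD_some, if_pos hbc]
    rw [hrest]
    simp [hminl, hbc]
  · -- old best stays
    have hne2 : ((i, c) : Int × Int) ≠ b := by
      intro h; rw [← h] at hbi; omega
    have hrest : (l ++ [(i, c)]).filter (fun e => decide (e ≠ b))
        = l.filter (fun e => decide (e ≠ b)) ++ [(i, c)] := by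
      rw [List.filter_append]; simp [hne2]
    simp only [pvTop2, hmin2, hminl, Option.getD_some, if_neg hbc]
    rw [hrest]
    rcases hr : l.filter (fun e => decide (e ≠ b)) with _ | ⟨y, t'⟩
    · -- b was the only entry: old second is the sentinel
      have h0 : (0 : Int) < c := by omega
      simp [pvmin_eq, pvMStep, hbc, h0]
    · obtain ⟨s, hs, hsmem⟩ := pvmin_some y t'
      have hsl : s ∈ l := by
        have h4 : s ∈ l.filter (fun e => decide (e ≠ b)) := hr ▸ hsmem
        exact List.mem_of_mem_filter h4
      have hsi : s.1 < i := hlt s hsl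
      have hsec : PySem.List.min2? (y :: (t' ++ [(i, c)]))
          (fun e => -e.2) (fun e => e.1) = if s.2 < c then some (i, c) else some s := by
        have h3 : y :: (t' ++ [(i, c)]) = (y :: t') ++ [(i, c)] := rfl
        rw [h3, pvmin_eq, List.foldl_append, ← pvmin_eq, hs]
        simpa using pvMStep_fresh s i c hsi
      by_cases hsc : s.2 < c
      · simp [hsec, hs, hsc]
      · simp [hsec, hs, hsc]

-- ---- dict-level alignment ----

lemma pvcontains_map (l : List (List String × List (Int × Int))) (k : List String) :
    (PySem.Dict.mk (l.map pvF) : PySem.Dict (List String) (Int × Int × Int × Int)).contains k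
      = (PySem.Dict.mk l).contains k := by
  simp [PySem.Dict.contains, List.any_map, Function.comp_def, pvF]

lemma pvget?_map (l : List (List String × List (Int × Int))) (k : List String) :
    (PySem.Dict.mk (l.map pvF) : PySem.Dict (List String) (Int × Int × Int × Int)).get? k
      = ((PySem.Dict.mk l).get? k).map pvTop2 := by
  simp only [PySem.Dict.get?, List.find?_map]
  have h1 : ((fun p : List String × (Int × Int × Int × Int) => p.1 == k) ∘ pvF)
      = (fun p : List String × List (Int × Int) => p.1 == k) := by
    funext p; rfl
  rw [h1]
  cases List.find? (fun p : List String × List (Int × Int) => p.1 == k) l <;> rfl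

lemma pvfind_unique (l : List (List String × List (Int × Int)))
    (hnd : (l.map (·.1)).Nodup) (k : List String) (v : List String × List (Int × Int))
    (h : List.find? (fun p => p.1 == k) l = some v) :
    ∀ p ∈ l, p.1 = k → p = v := by
  induction l with
  | nil => simp at h
  | cons x t ih =>
    simp only [List.map_cons, List.nodup_cons] at hnd
    intro p hp hpk
    by_cases hx : (x.1 == k) = true
    · have hv : v = x := by
        rw [List.find?_cons_of_pos (p := fun q : List String × List (Int × Int) => q.1 == k) hx] at h; exact (Option.some_inj.mp h).symm
      rcases List.mem_cons.mp hp with rfl | hpt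
      · exact hv ▸ rfl
      · exfalso
        have hxk : x.1 = k := by simpa using hx
        exact hnd.1 (hxk ▸ hpk ▸ List.mem_map_of_mem hpt)
    · rw [List.find?_cons_of_neg (p := fun q : List String × List (Int × Int) => q.1 == k) hx] at h
      rcases List.mem_cons.mp hp with rfl | hpt
      · exact absurd (by simp [hpk]) hx
      · exact ih hnd.2 h p hpt hpk

lemma pvgetD_cases (d : PySem.Dict (List String) (List (Int × Int))) (k : List String) :
    d.getD k [] = [] ∨ ∃ p ∈ d.items, p.1 = k ∧ d.getD k [] = p.2 := by
  rcases h : d.get? k with _ | v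
  · left; simp [PySem.Dict.getD, h]
  · right
    simp only [PySem.Dict.get?, Option.map_eq_some_iff] at h
    obtain ⟨p, hp, rfl⟩ := h
    refine ⟨p, List.mem_of_find?_eq_some hp, ?_, by simp [PySem.Dict.getD, PySem.Dict.get?, hp]⟩
    have := List.find?_some hp
    simpa using this

lemma pvmem_insert (d : PySem.Dict (List String) (List (Int × Int))) (k : List String)
    (v : List (Int × Int)) (p : List String × List (Int × Int))
    (hp : p ∈ (d.insert k v).items) : p = (k, v) ∨ p ∈ d.items := by
  unfold PySem.Dict.insert at hp
  split at hp
  · simp only [List.mem_map] at hp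
    obtain ⟨x, hx, hxe⟩ := hp
    by_cases hm : (x.1 == k) = true
    · simp [hm] at hxe; left; exact hxe.symm
    · simp [hm] at hxe; right; exact hxe ▸ hx
  · rcases List.mem_append.mp hp with h | h
    · exact Or.inr h
    · simp at h; left; exact h

lemma pvkeys_insert (d : PySem.Dict (List String) (List (Int × Int))) (k : List String)
    (v : List (Int × Int)) (hnd : (d.items.map (·.1)).Nodup) :
    ((d.insert k v).items.map (·.1)).Nodup := by
  unfold PySem.Dict.insert
  split
  · have h1 : (d.items.map (fun p => if (p.1 == k) = true then (k, v) else p)).map (·.1)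
        = d.items.map (·.1) := by
      rw [List.map_map]
      refine List.map_congr_left (fun p _ => ?_)
      simp only [Function.comp]
      by_cases hm : p.1 = k
      · simp [hm]
      · simp [hm]
    rw [h1]; exact hnd
  · rename_i hct
    simp only [List.map_append, List.map_cons, List.map_nil]
    refine List.Nodup.append hnd (List.nodup_singleton _) ?_
    intro a ha hb
    rw [List.mem_singleton] at hb
    subst hb
    rw [Bool.not_eq_true, PySem.Dict.contains, List.any_eq_false] at hct
    obtain ⟨p, hp, hpk⟩ := List.mem_map.mp ha
    exact hct p hp (by simp [hpk])

lemma pvgetD_contains_ne (d : PySem.Dict (List String) (List (Int × Int))) (k : List String)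
    (hct : d.contains k = false) : d.get? k = none := by
  simp only [PySem.Dict.get?, Option.map_eq_none_iff, List.find?_eq_none]
  intro p hp
  simp only [PySem.Dict.contains] at hct
  rw [List.any_eq_false] at hct
  exact fun h => absurd h (by simpa using hct p hp)

lemma pvinsert_map (l : List (List String × List (Int × Int))) (k : List String)
    (v : List (Int × Int)) :
    (PySem.Dict.mk (l.map pvF) : PySem.Dict (List String) (Int × Int × Int × Int)).insert k (pvTop2 v)
      = PySem.Dict.mk (((PySem.Dict.mk l).insert k v).items.map pvF) := by
  unfold PySem.Dict.insert
  by_cases hct : (PySem.Dict.mk l).contains k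
  · rw [pvcontains_map]
    simp only [hct, if_true]
    apply PySem.Dict.ext
    simp only [PySem.Dict.items, List.map_map]
    refine List.map_congr_left (fun p _ => ?_)
    simp only [Function.comp]
    by_cases hm : p.1 = k
    · simp [pvF, hm]
    · simp [pvF, hm]
  · rw [pvcontains_map]
    simp only [hct, if_false]
    apply PySem.Dict.ext
    simp [pvF]

-- one step of A's loop on the projected dict = project B's one step
lemma pvstep_align (i : Int) (d : PySem.Dict (List String) (List (Int × Int)))
    (q : List String × Int)
    (hnd : (d.items.map (·.1)).Nodup)
    (hne : ∀ p ∈ d.items, p.2 ≠ [])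
    (hfresh : ∀ e ∈ d.getD q.1 [], e.1 < i)
    (hc : 1 ≤ q.2) :
    pvStepA i (PySem.Dict.mk (d.items.map pvF)) q
      = PySem.Dict.mk ((pvStepX i d q).items.map pvF) := by
  obtain ⟨l⟩ := d
  by_cases hct : (PySem.Dict.mk l : PySem.Dict (List String) (List (Int × Int))).contains q.1
  · -- the ngram is already present in both dicts
    obtain ⟨lq, hget⟩ : ∃ lq, (PySem.Dict.mk l : PySem.Dict (List String) (List (Int × Int))).get? q.1 = some lq := by
      rcases hg : (PySem.Dict.mk l : PySem.Dict (List String) (List (Int × Int))).get? q.1 with _ | lq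
      · exfalso
        simp only [PySem.Dict.get?, Option.map_eq_none_iff, List.find?_eq_none] at hg
        simp only [PySem.Dict.contains, List.any_eq_true] at hct
        obtain ⟨p, hp, hpk⟩ := hct
        exact hg p hp hpk
      · exact ⟨lq, rfl⟩
    obtain ⟨p0, hfind, rfl⟩ : ∃ p0, List.find? (fun p => p.1 == q.1) l = some p0 ∧ p0.2 = lq := by
      simp only [PySem.Dict.get?, Option.map_eq_some_iff] at hget
      obtain ⟨p0, h1, h2⟩ := hget
      exact ⟨p0, h1, h2⟩
    have hp0mem : p0 ∈ l := List.mem_of_find?_eq_some hfind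
    have hp0k : p0.1 = q.1 := by simpa using List.find?_some hfind
    have hgd : (PySem.Dict.mk l : PySem.Dict (List String) (List (Int × Int))).getD q.1 [] = p0.2 := by
      simp [PySem.Dict.getD, hget]
    have hlqne : p0.2 ≠ [] := hne p0 hp0mem
    have hfr : ∀ e ∈ p0.2, e.1 < i := fun e he => hfresh e (hgd ▸ he)
    have hgdA : (PySem.Dict.mk (l.map pvF) : PySem.Dict (List String) (Int × Int × Int × Int)).getD q.1 (0, 0, 0, 0)
        = pvTop2 p0.2 := by
      simp [PySem.Dict.getD, pvget?_map, hget]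
    have hctA : (PySem.Dict.mk (l.map pvF) : PySem.Dict (List String) (Int × Int × Int × Int)).contains q.1 = true := by
      rw [pvcontains_map]; exact hct
    have core := pvTop2_append p0.2 i q.2 hlqne hfr hc
    unfold pvStepA pvStepX
    rw [hctA, hgdA, hgd]
    simp only [Bool.true_eq_false, if_false]
    rcases hq2 : pvTop2 p0.2 with ⟨i1, c1, i2, c2⟩
    rw [hq2] at core
    by_cases h1 : c1 < q.2
    · simp only [h1, if_true]
      have hv : (i, q.2, i1, c1) = pvTop2 (p0.2 ++ [(i, q.2)]) := by
        rw [core]; simp [h1]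
      rw [hv, pvinsert_map]
    · by_cases h2 : c2 < q.2
      · simp only [h1, if_false, h2, if_true]
        have hv : (i1, c1, i, q.2) = pvTop2 (p0.2 ++ [(i, q.2)]) := by
          rw [core]; simp [h1, h2]
        rw [hv, pvinsert_map]
      · simp only [h1, if_false, h2]
        -- A leaves its dict unchanged; B's append does not change the projection
        have hunch : pvTop2 (p0.2 ++ [(i, q.2)]) = pvTop2 p0.2 := by
          rw [core, hq2]; simp [h1, h2]
        unfold PySem.Dict.insert
        simp only [hct, if_true]
        apply PySem.Dict.ext
        simp only [PySem.Dict.items, List.map_map]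
        refine (List.map_congr_left (fun p hp => ?_)).symm
        simp only [Function.comp]
        by_cases hm : p.1 = q.1
        · have hpp : p = p0 := pvfind_unique l hnd q.1 p0 hfind p hp hm
          subst hpp
          simp [pvF, hm, hunch]
        · simp [hm]
  · -- fresh ngram: both sides append a new entry
    have hfalse : (PySem.Dict.mk l : PySem.Dict (List String) (List (Int × Int))).contains q.1 = false :=
      eq_false_of_ne_true hct
    have hany : (l.any fun p => p.1 == q.1) = false := by
      simpa [PySem.Dict.contains] using hfalse
    have hctA : (PySem.Dict.mk (l.map pvF) : PySem.Dict (List String) (Int × Int × Int × Int)).contains q.1 = false := by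
      rw [pvcontains_map]; exact hfalse
    have hg0 : (PySem.Dict.mk l : PySem.Dict (List String) (List (Int × Int))).get? q.1 = none :=
      pvgetD_contains_ne _ _ hfalse
    have hgd : (PySem.Dict.mk l : PySem.Dict (List String) (List (Int × Int))).getD q.1 [] = [] := by
      simp [PySem.Dict.getD, hg0]
    have hanyA : ((l.map pvF).any fun p => p.1 == q.1) = false := by
      have h5 := pvcontains_map l q.1
      rw [hfalse] at h5
      simpa [PySem.Dict.contains] using h5
    unfold pvStepA pvStepX
    rw [hctA, hgd, if_pos rfl]
    apply PySem.Dict.ext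
    unfold PySem.Dict.insert
    simp only [PySem.Dict.contains, hany, hanyA, Bool.false_eq_true, if_false]
    simp [pvF, pvTop2_singleton]

lemma pvinner (its : List (List String × Int)) (i : Int)
    (d : PySem.Dict (List String) (List (Int × Int)))
    (hknd : (its.map (·.1)).Nodup)
    (hcnt : ∀ q ∈ its, 1 ≤ q.2)
    (hnd : (d.items.map (·.1)).Nodup)
    (hne : ∀ p ∈ d.items, p.2 ≠ [])
    (hfresh : ∀ q ∈ its, ∀ e ∈ d.getD q.1 [], e.1 < i) :
    its.foldl (pvStepA i) (PySem.Dict.mk (d.items.map pvF))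
      = PySem.Dict.mk ((its.foldl (pvStepX i) d).items.map pvF) := by
  induction its generalizing d with
  | nil => rfl
  | cons q its' ih =>
    simp only [List.map_cons, List.nodup_cons] at hknd
    simp only [List.foldl_cons]
    rw [pvstep_align i d q hnd hne (hfresh q List.mem_cons_self) (hcnt q List.mem_cons_self)]
    refine ih (pvStepX i d q) hknd.2 (fun q' hq' => hcnt q' (List.mem_cons_of_mem _ hq')) ?_ ?_ ?_
    · exact pvkeys_insert d q.1 _ hnd
    · intro p hp
      rcases pvmem_insert d q.1 _ p hp with rfl | hp'
      · simp
      · exact hne p hp'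
    · intro q' hq' e he
      have hne' : q'.1 ≠ q.1 := by
        intro h
        exact hknd.1 (h ▸ List.mem_map_of_mem hq')
      rw [show (pvStepX i d q) = d.insert q.1 (d.getD q.1 [] ++ [(i, q.2)]) from rfl,
        PySem.Dict.getD_insert_of_ne d _ _ hne'] at he
      exact hfresh q' (List.mem_cons_of_mem _ hq') e he

lemma pvXinv (its : List (List String × Int)) (i : Int)
    (d : PySem.Dict (List String) (List (Int × Int)))
    (hnd : (d.items.map (·.1)).Nodup)
    (hne : ∀ p ∈ d.items, p.2 ≠ [])
    (hub : ∀ p ∈ d.items, ∀ e ∈ p.2, e.1 < i + 1) :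
    (((its.foldl (pvStepX i) d).items.map (·.1)).Nodup)
    ∧ (∀ p ∈ (its.foldl (pvStepX i) d).items, p.2 ≠ [])
    ∧ (∀ p ∈ (its.foldl (pvStepX i) d).items, ∀ e ∈ p.2, e.1 < i + 1) := by
  induction its generalizing d with
  | nil => exact ⟨hnd, hne, hub⟩
  | cons q its' ih =>
    simp only [List.foldl_cons]
    refine ih _ (pvkeys_insert d q.1 _ hnd) ?_ ?_
    · intro p hp
      rcases pvmem_insert d q.1 _ p hp with rfl | hp'
      · simp
      · exact hne p hp'
    · intro p hp e he
      rcases pvmem_insert d q.1 _ p hp with rfl | hp'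
      · simp only at he
        rcases List.mem_append.mp he with h | h
        · rcases pvgetD_cases d q.1 with h0 | ⟨p', hp', _, hg⟩
          · rw [h0] at h; simp at h
          · exact hub p' hp' e (hg ▸ h)
        · rw [List.mem_singleton] at h; rw [h]; simp
      · exact hub p hp' e he

lemma pvouter (refs : List (List String)) (n : Int) :
    ∀ (s : Int) (d : PySem.Dict (List String) (List (Int × Int))),
    (d.items.map (·.1)).Nodup →
    (∀ p ∈ d.items, p.2 ≠ []) →
    (∀ p ∈ d.items, ∀ e ∈ p.2, e.1 < s) →
    (PySem.List.enumerate refs s).foldl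
        (fun d p => ((PySem.Dict.counter (get_ngrams p.2 n)).items).foldl (pvStepA p.1) d)
        (PySem.Dict.mk (d.items.map pvF))
      = PySem.Dict.mk
          (((PySem.List.enumerate refs s).foldl
            (fun d p => ((PySem.Dict.counter (get_ngrams p.2 n)).items).foldl (pvStepX p.1) d)
            d).items.map pvF) := by
  induction refs with
  | nil => intro s d _ _ _; rfl
  | cons r rs ih =>
    intro s d hnd hne hub
    rw [PySem.List.enumerate_cons]
    simp only [List.foldl_cons]
    have hknd : (((PySem.Dict.counter (get_ngrams r n)).items).map (·.1)).Nodup :=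
      PySem.Dict.nodup_keys_counter _
    have hcnt : ∀ q ∈ (PySem.Dict.counter (get_ngrams r n)).items, 1 ≤ q.2 := by
      intro q hq
      rw [PySem.Dict.items_counter] at hq
      obtain ⟨k, hk, rfl⟩ := List.mem_map.mp hq
      have hx : k ∈ get_ngrams r n := (PySem.Set.mem_ofList _ _).mp hk
      have : 0 < (get_ngrams r n).count k := List.count_pos_iff.mpr hx
      simp only
      omega
    have hfresh : ∀ q ∈ (PySem.Dict.counter (get_ngrams r n)).items,
        ∀ e ∈ d.getD q.1 [], e.1 < s := by
      intro q _ e he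
      rcases pvgetD_cases d q.1 with h0 | ⟨p', hp', _, hg⟩
      · rw [h0] at he; simp at he
      · exact hub p' hp' e (hg ▸ he)
    rw [pvinner _ s d hknd hcnt hnd hne hfresh]
    obtain ⟨hnd', hne', hub'⟩ := pvXinv ((PySem.Dict.counter (get_ngrams r n)).items) s d hnd hne
      (fun p hp e he => by have := hub p hp e he; omega)
    exact ih (s + 1) _ hnd' hne' hub'

-- ===== VERDICT (by name: the statement is the Claim_ definition above) =====
theorem pre_calc_max_cnts_spec : Claim_equal_pre_calc_max_cnts := by
  intro refs n _
  unfold Spec_pre_calc_max_cnts pre_calc_max_cnts pre_calc_max_cnts_alt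
  have h := pvouter refs n 0 (PySem.Dict.mk []) (by simp) (by simp) (by simp)
  simpa using congrArg PySem.Dict.items h
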